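-- pv_equiv track=rewrite | github.com/fauzanridho/ScanCamAnalyze | deploy/app.py | calculate_severity_level
-- ===== SOURCE A (Python) =====
-- def calculate_severity_level(detections):
--     class_detections = {}
--     for detection in detections:
--         class_id = detection[0]
--         if class_id not in class_detections:
--             class_detections[class_id] = 1
--         else:
--             class_detections[class_id] += 1
--     if 3 in class_detections:
--         del class_detections[3]
--     num_classes_detected = len(class_detections)
--     total_bboxes = sum(class_detections.values())
--     if num_classes_detected == 0:
--         return 0
--     elif num_classes_detected == 1 and total_bboxes <= 3:
--         return 1
--     elif num_classes_detected == 2 and total_bboxes <= 4: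
--         return 2
--     elif num_classes_detected == 3 and total_bboxes >= 5:
--         return 3
--     else:
--         return 3
-- ===== SOURCE B (Python) =====
-- def calculate_severity_level(detections):
--     # Single-pass early-exit scan: return 3 as soon as the severity is forced
--     # (more than 2 distinct non-3 classes, or more boxes than classes+2);
--     # otherwise the severity is simply the number of distinct non-3 classes.
--     seen = []
--     total = 0
--     for detection in detections:
--         class_id = detection[0]
--         if class_id == 3:
--             continue
--         if class_id not in seen:
--             seen.append(class_id)
--         total += 1
--         if len(seen) > 2 or total > len(seen) + 2:
--             return 3
--     return len(seen)
-- ===== Notes on version B (the rewrite author's own statement) =====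
-- stated objective: alternative
-- what changed: Replaces the build-histogram/delete-key-3/threshold-chain with a single early-exit scan: B keeps only a distinct-class list and a running count, returns 3 the moment severity is forced (>2 distinct non-3 classes, or more boxes than classes+2), and otherwise returns the number of distinct classes directly with no final branch chain.
import Mathlib
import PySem

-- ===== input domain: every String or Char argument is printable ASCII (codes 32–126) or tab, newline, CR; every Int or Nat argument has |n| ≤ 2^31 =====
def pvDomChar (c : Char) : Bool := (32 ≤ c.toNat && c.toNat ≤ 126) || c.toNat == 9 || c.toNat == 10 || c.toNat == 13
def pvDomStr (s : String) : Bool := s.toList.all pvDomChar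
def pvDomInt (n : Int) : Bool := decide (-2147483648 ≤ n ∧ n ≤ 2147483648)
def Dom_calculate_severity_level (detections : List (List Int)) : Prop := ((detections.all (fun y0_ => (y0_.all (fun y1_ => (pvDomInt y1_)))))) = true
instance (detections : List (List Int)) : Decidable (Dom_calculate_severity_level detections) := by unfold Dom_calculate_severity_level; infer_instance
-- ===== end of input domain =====

-- B replaces A's build-histogram / delete-key-3 / threshold-chain pipeline by a single
-- early-exit scan that returns 3 as soon as the severity is forced and otherwise returns
-- the number of distinct non-3 classes directly; objective: alternative.

-- ===== PORT A =====
def calculate_severity_level (detections : List (List Int)) : Int :=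
  let class_detections : PySem.Dict Int Int :=
    detections.foldl (fun d detection =>
      let class_id := PySem.List.pyGetD detection 0 0
      if d.contains class_id = false then d.insert class_id 1
      else d.insert class_id (d.getD class_id 0 + 1)) PySem.Dict.empty
  let class_detections2 :=
    if class_detections.contains 3 then class_detections.erase 3 else class_detections
  let num_classes_detected : Int := (PySem.Dict.size class_detections2 : Int)
  let total_bboxes : Int := class_detections2.values.sum
  if num_classes_detected = 0 then 0
  else if num_classes_detected = 1 ∧ total_bboxes ≤ 3 then 1
  else if num_classes_detected = 2 ∧ total_bboxes ≤ 4 then 2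
  else if num_classes_detected = 3 ∧ total_bboxes ≥ 5 then 3
  else 3

-- ===== PORT B =====
-- B's loop: seen is a Python list kept duplicate-free by the membership test (= PySem.Set);
-- the early 'return 3' becomes the non-recursive branch.
def pvAltLoop (rest : List (List Int)) (seen : PySem.Set Int) (total : Int) : Int :=
  match rest with
  | [] => PySem.Set.len seen
  | detection :: rest =>
    let class_id := PySem.List.pyGetD detection 0 0
    if class_id == 3 then pvAltLoop rest seen total
    else
      let seen' := PySem.Set.add seen class_id
      let total' := total + 1
      if PySem.Set.len seen' > 2 ∨ total' > PySem.Set.len seen' + 2 then 3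
      else pvAltLoop rest seen' total'

def calculate_severity_level_alt (detections : List (List Int)) : Int :=
  pvAltLoop detections PySem.Set.empty 0

-- ===== PRECONDITION & SPEC =====
-- Pre_ excludes exactly the inputs with an empty detection row, on which Python A (and B) raises IndexError.
def Pre_calculate_severity_level (detections : List (List Int)) : Prop :=
  ∀ d ∈ detections, d ≠ []
instance (detections : List (List Int)) : Decidable (Pre_calculate_severity_level detections) := by
  unfold Pre_calculate_severity_level; infer_instance

def pvWitness_calculate_severity_level : List (List Int) := [[0, 7], [2], [0]]

def Spec_calculate_severity_level (detections : List (List Int)) (out : Int) : Prop := out = calculate_severity_level_alt detections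
instance (detections : List (List Int)) (out : Int) : Decidable (Spec_calculate_severity_level detections out) := by unfold Spec_calculate_severity_level; infer_instance

-- ===== CLAIM (what is proved, stated in full; the proofs are below) =====
def Claim_equal_calculate_severity_level : Prop := ∀ (detections : List (List Int)), Dom_calculate_severity_level detections → Pre_calculate_severity_level detections → Spec_calculate_severity_level detections (calculate_severity_level detections)

-- ===== LEMMAS AND PROOFS =====

-- the common closed form both ports are reduced to
def pvSev (num total : Int) : Int := if num > 2 ∨ total > num + 2 then 3 else num

-- ---- facts about PySem.Set.add / fold of adds ----

theorem set_len_add (s : PySem.Set Int) (x : Int) :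
    PySem.Set.len (PySem.Set.add s x) = if x ∈ s then PySem.Set.len s else PySem.Set.len s + 1 := by
  by_cases h : x ∈ s <;> simp [PySem.Set.add, PySem.Set.contains, PySem.Set.len, h]

theorem set_len_foldl_ge (xs : List Int) : ∀ s : PySem.Set Int,
    PySem.Set.len s ≤ PySem.Set.len (xs.foldl PySem.Set.add s) := by
  induction xs with
  | nil => intro s; simp
  | cons x xs ih =>
    intro s
    refine le_trans ?_ (ih (PySem.Set.add s x))
    rw [set_len_add]; split_ifs <;> omega

theorem set_len_foldl_le (xs : List Int) : ∀ s : PySem.Set Int,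
    PySem.Set.len (xs.foldl PySem.Set.add s) ≤ PySem.Set.len s + xs.length := by
  induction xs with
  | nil => intro s; simp
  | cons x xs ih =>
    intro s
    refine le_trans (ih (PySem.Set.add s x)) ?_
    rw [set_len_add]; split_ifs <;> simp <;> omega

-- ---- B's loop computes the closed form ----

theorem pvAltLoop_eq (rest : List (List Int)) : ∀ (seen : PySem.Set Int) (total : Int),
    PySem.Set.len seen ≤ 2 → total ≤ PySem.Set.len seen + 2 →
    pvAltLoop rest seen total =
      pvSev
        (PySem.Set.len
          (((rest.map (fun d => PySem.List.pyGetD d 0 0)).filter (fun k => !(k == 3))).foldl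
            PySem.Set.add seen))
        (total + (((rest.map (fun d => PySem.List.pyGetD d 0 0)).filter (fun k => !(k == 3))).length : Int)) := by
  induction rest with
  | nil =>
    intro seen total h1 h2
    simp only [List.map_nil, List.filter_nil, List.foldl_nil, List.length_nil, pvAltLoop, pvSev]
    rw [if_neg (by push_cast; omega)]
  | cons d rest ih =>
    intro seen total h1 h2
    simp only [pvAltLoop, List.map_cons]
    by_cases h3 : PySem.List.pyGetD d 0 0 = 3
    · simp only [h3, List.filter_cons, beq_self_eq_true, Bool.not_true, if_pos, BEq.rfl]
      simpa using ih seen total h1 h2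
    · have hb : ((PySem.List.pyGetD d 0 0 == 3) : Bool) = false := by simpa using h3
      simp only [hb, List.filter_cons, Bool.not_false, if_true, if_false, Bool.false_eq_true,
        List.foldl_cons, List.length_cons]
      by_cases h4 : PySem.Set.len (PySem.Set.add seen (PySem.List.pyGetD d 0 0)) > 2 ∨
          total + 1 > PySem.Set.len (PySem.Set.add seen (PySem.List.pyGetD d 0 0)) + 2
      · rw [if_pos h4]
        -- early exit: the final closed form is also 3
        have hge := set_len_foldl_ge
          ((rest.map (fun d => PySem.List.pyGetD d 0 0)).filter (fun k => !(k == 3)))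
          (PySem.Set.add seen (PySem.List.pyGetD d 0 0))
        have hle := set_len_foldl_le
          ((rest.map (fun d => PySem.List.pyGetD d 0 0)).filter (fun k => !(k == 3)))
          (PySem.Set.add seen (PySem.List.pyGetD d 0 0))
        unfold pvSev
        rw [if_pos (by push_cast at hge hle ⊢; omega)]
      · rw [if_neg h4]
        push_neg at h4
        have := ih (PySem.Set.add seen (PySem.List.pyGetD d 0 0)) (total + 1) h4.1 (by omega)
        rw [this]
        congr 1
        push_cast
        ring

-- ---- A's side: machinery reducing the dict pipeline to (set, length) of the filtered ids ----

-- A's loop body is exactly the Counter update step.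
theorem stepA_eq_counter_step :
    (fun (d : PySem.Dict Int Int) (detection : List Int) =>
      let class_id := PySem.List.pyGetD detection 0 0
      if d.contains class_id = false then d.insert class_id 1
      else d.insert class_id (d.getD class_id 0 + 1)) =
    (fun (d : PySem.Dict Int Int) (detection : List Int) =>
      d.modify (PySem.List.pyGetD detection 0 0) 0 (· + 1)) := by
  funext d detection
  simp only [PySem.Dict.modify]
  by_cases h : d.contains (PySem.List.pyGetD detection 0 0) = true
  · simp [h]
  · simp only [Bool.not_eq_true] at h
    rw [PySem.Dict.getD_of_not_contains _ _ h]
    simp [h]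

-- Set.add commutes with filter.
theorem set_add_filter (p : Int → Bool) (s : PySem.Set Int) (x : Int) :
    (PySem.Set.add s x).filter p =
      if p x then PySem.Set.add (s.filter p) x else s.filter p := by
  by_cases hx : x ∈ s
  · by_cases hp : p x
    · have hxf : x ∈ s.filter p := List.mem_filter.mpr ⟨hx, hp⟩
      simp [PySem.Set.add, PySem.Set.contains, hx, hxf]
    · simp [PySem.Set.add, PySem.Set.contains, hx]
  · by_cases hp : p x
    · have hxf : x ∉ s.filter p := fun h => hx (List.mem_filter.mp h).1
      simp [PySem.Set.add, PySem.Set.contains, hx, hp, hxf, List.filter_append]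
    · simp [PySem.Set.add, PySem.Set.contains, hx, hp, List.filter_append]

theorem foldl_add_filter (p : Int → Bool) (xs : List Int) :
    ∀ s : PySem.Set Int,
      (xs.foldl PySem.Set.add s).filter p =
        (xs.filter p).foldl PySem.Set.add (s.filter p) := by
  induction xs with
  | nil => intro s; simp
  | cons x xs ih =>
    intro s
    by_cases hp : p x
    · simp only [List.foldl_cons, List.filter_cons, hp, if_pos]
      rw [ih, set_add_filter, if_pos hp]
    · simp only [List.foldl_cons, List.filter_cons, hp]
      rw [ih, set_add_filter, if_neg hp]
      simp

-- set(filter) = filter(set)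
theorem ofList_filter (p : Int → Bool) (xs : List Int) :
    PySem.Set.ofList (xs.filter p) = (PySem.Set.ofList xs).filter p := by
  rw [PySem.Set.ofList_eq_foldl, PySem.Set.ofList_eq_foldl, foldl_add_filter]
  simp

-- summing the multiplicities of the distinct elements recovers the length
theorem sum_counts_eq_length (xs : List Int) :
    ∀ S : List Int, S.Nodup → (∀ y ∈ xs, y ∈ S) →
      (S.map (fun k => (xs.count k : Int))).sum = (xs.length : Int) := by
  induction xs with
  | nil => intro S _ _; simp
  | cons x xs ih =>
    intro S hnd hmem
    have hx : x ∈ S := hmem x (List.mem_cons_self ..)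
    have hcount : ∀ k : Int, (x :: xs).count k = xs.count k + if k == x then 1 else 0 := by
      intro k
      have hbc : ((x == k) : Bool) = (k == x) := by
        by_cases h : x = k
        · simp [h]
        · simp [h, Ne.symm h]
      rw [List.count_cons, hbc]
    have h1 : (S.map (fun k => ((x :: xs).count k : Int))).sum =
        (S.map (fun k => (xs.count k : Int) + if k == x then 1 else 0)).sum := by
      congr 1
      refine List.map_congr_left fun k _ => ?_
      rw [hcount k]; push_cast; split_ifs <;> simp
    rw [h1, PySem.List.sum_map_add_int _ _ (fun k => if k == x then 1 else 0),
      PySem.List.sum_map_ite_one_zero (fun k => k == x),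
      ih S hnd (fun y hy => hmem y (List.mem_cons_of_mem _ hy))]
    have hc1 : S.countP (fun k => k == x) = 1 := by
      have hcc : S.countP (fun k => k == x) = S.count x := rfl
      rw [hcc]
      exact List.count_eq_one_of_mem hnd hx
    rw [hc1]
    simp [List.length_cons]

-- the dict A builds (after deleting key 3), read off as size and value-sum
theorem dict_path (ids : List Int) :
    ((PySem.Dict.size (if (PySem.Dict.counter ids).contains 3
        then (PySem.Dict.counter ids).erase 3 else PySem.Dict.counter ids) : Int) =
      PySem.Set.len (PySem.Set.ofList (ids.filter (fun k => !(k == 3)))) ∧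
     (if (PySem.Dict.counter ids).contains 3
        then (PySem.Dict.counter ids).erase 3 else PySem.Dict.counter ids).values.sum =
      ((ids.filter (fun k => !(k == 3))).length : Int)) := by
  have hitems : (if (PySem.Dict.counter ids).contains 3
      then (PySem.Dict.counter ids).erase 3 else PySem.Dict.counter ids).items =
      ((PySem.Set.ofList ids).filter (fun k => !(k == 3))).map
        (fun k => (k, (ids.count k : Int))) := by
    by_cases h : (PySem.Dict.counter ids).contains 3 = true
    · simp only [h, if_pos, PySem.Dict.erase, PySem.Dict.items_counter, List.filter_map]
      rfl
    · simp only [h, if_neg, Bool.false_eq_true, not_false_iff, PySem.Dict.items_counter]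
      have hf : (PySem.Dict.counter ids).contains 3 = false := by simpa using h
      have hany : (PySem.Dict.counter ids).items.any (fun p => p.1 == 3) = false := hf
      have hall : ∀ p ∈ (PySem.Dict.counter ids).items, (!(p.1 == 3)) = true := by
        intro p hp
        have := (List.any_eq_false).mp hany p hp
        simpa using this
      rw [PySem.Dict.items_counter] at hall
      have := List.filter_eq_self.mpr hall
      rw [List.filter_map] at this
      rw [← this]
      rfl
  constructor
  · rw [PySem.Dict.size, hitems, List.length_map, ofList_filter, PySem.Set.len]
  · rw [PySem.Dict.values, hitems, List.map_map]
    have hS : ((PySem.Set.ofList ids).filter (fun k => !(k == 3))).map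
          ((fun p => p.2) ∘ (fun k => (k, (ids.count k : Int)))) =
        ((PySem.Set.ofList ids).filter (fun k => !(k == 3))).map
          (fun k => ((ids.filter (fun k => !(k == 3))).count k : Int)) := by
      refine List.map_congr_left fun k hk => ?_
      have hq : (!(k == 3)) = true := (List.mem_filter.mp hk).2
      simp only [Function.comp]
      rw [List.count_filter (p := fun k : Int => !(k == 3)) (a := k) hq]
    rw [hS]
    refine sum_counts_eq_length _ _ (List.Nodup.filter _ (PySem.Set.nodup_ofList ids)) ?_
    intro y hy
    rcases List.mem_filter.mp hy with ⟨hy1, hy2⟩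
    exact List.mem_filter.mpr ⟨(PySem.Set.mem_ofList ids y).mpr hy1, hy2⟩

-- an empty distinct set means an empty list
theorem ofList_len_zero (xs : List Int) :
    PySem.Set.len (PySem.Set.ofList xs) = 0 → (xs.length : Int) = 0 := by
  intro h
  cases xs with
  | nil => simp
  | cons x xs =>
    exfalso
    have hx : x ∈ PySem.Set.ofList (x :: xs) :=
      (PySem.Set.mem_ofList _ _).mpr (List.mem_cons_self ..)
    have : PySem.Set.ofList (x :: xs) = [] := by
      have := List.length_eq_zero_iff.mp (by have := h; simpa [PySem.Set.len] using this)
      exact this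
    rw [this] at hx
    simp at hx

-- A's threshold chain equals the closed form pvSev on (set size, filtered length)
theorem chain_eq_sev (xs : List Int) :
    (let num : Int := PySem.Set.len (PySem.Set.ofList xs)
     let total : Int := (xs.length : Int)
     if num = 0 then (0 : Int)
     else if num = 1 ∧ total ≤ 3 then 1
     else if num = 2 ∧ total ≤ 4 then 2
     else if num = 3 ∧ total ≥ 5 then 3
     else 3) =
    pvSev (PySem.Set.len (PySem.Set.ofList xs)) (xs.length : Int) := by
  have h0 := ofList_len_zero xs
  unfold pvSev
  have hle : PySem.Set.len (PySem.Set.ofList xs) ≤ (xs.length : Int) := by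
    have := set_len_foldl_le xs PySem.Set.empty
    simp only [PySem.Set.empty] at this
    rw [← PySem.Set.ofList_eq_foldl] at this
    simpa using this
  have hnn : (0 : Int) ≤ PySem.Set.len (PySem.Set.ofList xs) := by
    simp [PySem.Set.len]
  simp only []
  split_ifs <;> omega

-- ===== VERDICT (by name: the statement is the Claim_ definition above) =====
theorem calculate_severity_level_spec : Claim_equal_calculate_severity_level := by
  intro detections _ _
  unfold Spec_calculate_severity_level calculate_severity_level calculate_severity_level_alt
  rw [stepA_eq_counter_step]
  rw [show (fun (d : PySem.Dict Int Int) (detection : List Int) =>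
        d.modify (PySem.List.pyGetD detection 0 0) 0 (· + 1)) =
      (fun (d : PySem.Dict Int Int) (detection : List Int) =>
        (fun (d' : PySem.Dict Int Int) (x : Int) => d'.modify x 0 (· + 1)) d
          (PySem.List.pyGetD detection 0 0)) from rfl]
  rw [← List.foldl_map (f := fun (detection : List Int) => PySem.List.pyGetD detection 0 0)
      (g := fun (d' : PySem.Dict Int Int) (x : Int) => d'.modify x 0 (· + 1)),
    ← PySem.Dict.counter_eq_foldl]
  dsimp only []
  obtain ⟨h1, h2⟩ := dict_path (detections.map (fun d => PySem.List.pyGetD d 0 0))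
  rw [h1, h2]
  have hB := pvAltLoop_eq detections PySem.Set.empty 0
    (by simp [PySem.Set.empty, PySem.Set.len]) (by simp [PySem.Set.empty, PySem.Set.len])
  rw [hB]
  have hemp : (((detections.map (fun d => PySem.List.pyGetD d 0 0)).filter
        (fun k => !(k == 3))).foldl PySem.Set.add PySem.Set.empty) =
      PySem.Set.ofList ((detections.map (fun d => PySem.List.pyGetD d 0 0)).filter
        (fun k => !(k == 3))) := by
    rw [PySem.Set.ofList_eq_foldl]
    rfl
  rw [hemp, zero_add]
  exact chain_eq_sev _
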